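-- pv_equiv track=rewrite | github.com/ssoad/Competitive-Programming-Playground | Codeforces/A_Array_with_Odd_Sum.py | solve
-- ===== SOURCE A (Python) =====
-- def solve(n, nums_arr):
--
--     even = odd = 0
--
--     for i in range(n):
--         if nums_arr[i] % 2 == 0:
--             even += 1
--         else:
--             odd += 1
--
--     return "NO" if odd == 0 or (even == 0 and odd % 2 == 0) else "YES"
-- ===== SOURCE B (Python) =====
-- def solve(n, nums_arr):
--     pre = nums_arr[:max(0, n)]
--     s = sum(pre)
--     has_even = any(x % 2 == 0 for x in pre)
--     has_odd = any(x % 2 != 0 for x in pre)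
--     return "YES" if s % 2 == 1 or (has_even and has_odd) else "NO"
-- ===== Notes on version B (the rewrite author's own statement) =====
-- stated objective: simpler
-- what changed: Replaces the even/odd tally loop with a sum over the prefix plus two existence flags, deciding via sum parity (S%2==1) or the presence of both an even and an odd element.
import Mathlib
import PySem

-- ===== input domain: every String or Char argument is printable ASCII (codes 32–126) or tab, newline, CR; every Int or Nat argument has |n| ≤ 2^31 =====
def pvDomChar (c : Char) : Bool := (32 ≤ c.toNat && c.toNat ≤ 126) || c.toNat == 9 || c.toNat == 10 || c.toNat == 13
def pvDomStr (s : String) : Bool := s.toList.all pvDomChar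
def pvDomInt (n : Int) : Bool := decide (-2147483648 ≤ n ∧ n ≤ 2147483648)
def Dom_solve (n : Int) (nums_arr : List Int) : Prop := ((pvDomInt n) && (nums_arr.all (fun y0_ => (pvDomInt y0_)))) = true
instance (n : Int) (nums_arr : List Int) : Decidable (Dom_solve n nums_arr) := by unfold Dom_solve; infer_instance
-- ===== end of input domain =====

-- B replaces A's even/odd tally loop with a prefix sum plus two existence flags (simpler decomposition, same cost).

-- ===== PORT A =====
def solve (n : Int) (nums_arr : List Int) : String :=
  let eo := (PySem.List.pyRange 0 n 1).foldl
    (fun (p : Int × Int) i =>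
      if PySem.Int.mod (PySem.List.pyGetD nums_arr i 0) 2 = 0 then (p.1 + 1, p.2)
      else (p.1, p.2 + 1))
    (0, 0)
  if eo.2 = 0 ∨ (eo.1 = 0 ∧ PySem.Int.mod eo.2 2 = 0) then "NO" else "YES"

-- ===== PORT B =====
def solve_alt (n : Int) (nums_arr : List Int) : String :=
  let pre := PySem.List.slice nums_arr none (some (max 0 n))
  let s := pre.sum
  let hasEven := pre.any (fun x => PySem.Int.mod x 2 = 0)
  let hasOdd := pre.any (fun x => PySem.Int.mod x 2 ≠ 0)
  if PySem.Int.mod s 2 = 1 ∨ (hasEven ∧ hasOdd) then "YES" else "NO"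

-- ===== PRECONDITION & SPEC =====
-- Pre_ excludes n > len(nums_arr), where A raises IndexError.
def Pre_solve (n : Int) (nums_arr : List Int) : Prop := n ≤ (nums_arr.length : Int)
instance (n : Int) (nums_arr : List Int) : Decidable (Pre_solve n nums_arr) := by unfold Pre_solve; infer_instance
def pvWitness_solve : Int × List Int := (3, [1, 2, 3])

def Spec_solve (n : Int) (nums_arr : List Int) (out : String) : Prop := out = solve_alt n nums_arr
instance (n : Int) (nums_arr : List Int) (out : String) : Decidable (Spec_solve n nums_arr out) := by unfold Spec_solve; infer_instance

-- ===== CLAIM =====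
def Claim_equal_solve : Prop := ∀ (n : Int) (nums_arr : List Int), Dom_solve n nums_arr → Pre_solve n nums_arr → Spec_solve n nums_arr (solve n nums_arr)

-- ===== LEMMAS AND PROOFS =====

-- Python '% 2' is Lean's emod for the positive divisor 2.
theorem pymod2 (a : Int) : PySem.Int.mod a 2 = a % 2 :=
  PySem.Int.mod_eq_emod_of_pos (by norm_num)

-- A's tally fold characterised: even/odd counts of the traversed elements.
theorem tally_fold (l : List Int) (e o : Int) :
    l.foldl (fun (p : Int × Int) x =>
      if x % 2 = 0 then (p.1 + 1, p.2) else (p.1, p.2 + 1)) (e, o)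
    = (e + (l.countP (fun x => x % 2 = 0) : Int),
       o + (l.countP (fun x => x % 2 ≠ 0) : Int)) := by
  induction l generalizing e o with
  | nil => simp
  | cons x xs ih =>
    simp only [List.foldl_cons, List.countP_cons]
    by_cases h : x % 2 = 0
    · rw [if_pos h, ih, if_pos (by simp [h]), if_neg (by simp [h])]
      simp only [Prod.mk.injEq]
      push_cast
      constructor <;> ring
    · rw [if_neg h, ih, if_neg (by simp [h]), if_pos (by simp [h])]
      simp only [Prod.mk.injEq]
      push_cast
      constructor <;> ring

-- Sum parity equals odd-count parity.
theorem sum_parity (l : List Int) :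
    l.sum % 2 = ((l.countP (fun x => x % 2 ≠ 0) : Nat) : Int) % 2 := by
  induction l with
  | nil => simp
  | cons x xs ih =>
    simp only [List.sum_cons, List.countP_cons]
    by_cases h : x % 2 = 0
    · rw [if_neg (by simp [h])]
      push_cast at ih ⊢
      omega
    · rw [if_pos (by simp [h])]
      push_cast at ih ⊢
      omega

theorem solve_spec : Claim_equal_solve := by
  intro n nums_arr _hd hpre
  unfold Pre_solve at hpre
  simp only [Spec_solve, solve, solve_alt, pymod2]
  -- both sides traverse the same prefix l := nums_arr[:max 0 n]
  have hslice : PySem.List.slice nums_arr none (some (max 0 n))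
      = nums_arr.take (max 0 n).toNat := by
    rw [PySem.List.slice_to]
    exact le_max_left 0 n
  set l := nums_arr.take (max 0 n).toNat with hl
  have hrange : (PySem.List.pyRange 0 n 1).foldl
      (fun (p : Int × Int) i =>
        if PySem.List.pyGetD nums_arr i 0 % 2 = 0 then (p.1 + 1, p.2)
        else (p.1, p.2 + 1)) (0, 0)
      = l.foldl (fun (p : Int × Int) x =>
        if x % 2 = 0 then (p.1 + 1, p.2) else (p.1, p.2 + 1)) (0, 0) := by
    by_cases hn : n ≤ 0
    · rw [PySem.List.pyRange_one_eq_nil hn]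
      have h0 : (max 0 n).toNat = 0 := by omega
      simp [hl, h0]
    · have hlen : (l.length : Int) = n := by
        simp only [hl, List.length_take]
        omega
      rw [show PySem.List.pyRange 0 n 1 = PySem.List.pyRange 0 (l.length : Int) 1 by rw [hlen]]
      have hcong : ∀ (a : Int × Int), ∀ i ∈ PySem.List.pyRange 0 (l.length : Int) 1,
          (if PySem.List.pyGetD nums_arr i 0 % 2 = 0 then (a.1 + 1, a.2) else (a.1, a.2 + 1))
          = (if PySem.List.pyGetD l i 0 % 2 = 0 then (a.1 + 1, a.2) else (a.1, a.2 + 1)) := by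
        intro a i hi
        rw [PySem.List.mem_pyRange_one] at hi
        obtain ⟨k, rfl⟩ : ∃ k : Nat, i = (k : Int) :=
          ⟨i.toNat, (Int.toNat_of_nonneg hi.1).symm⟩
        have hk : k < l.length := by omega
        simp only [PySem.List.pyGetD_natCast]
        have hk2 : k < (max 0 n).toNat := by
          rw [hl, List.length_take] at hk
          omega
        have hget : l[k]? = nums_arr[k]? := by
          rw [hl, List.getElem?_take_of_lt hk2]
        simp only [List.getD_eq_getElem?_getD, hget]
      rw [PySem.List.foldl_congr_mem _ _ _ _ hcong]
      exact PySem.List.foldl_pyRange_zero_pyGetD' l 0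
        (fun (p : Int × Int) x => if x % 2 = 0 then (p.1 + 1, p.2) else (p.1, p.2 + 1)) (0, 0)
  rw [hslice, hrange, tally_fold]
  -- now a statement about the counts over l
  have hsum := sum_parity l
  have he : (l.any (fun x => x % 2 = 0) = true) ↔ 0 < l.countP (fun x => x % 2 = 0) := by
    rw [List.countP_pos_iff]
    simp
  have ho : (l.any (fun x => x % 2 ≠ 0) = true) ↔ 0 < l.countP (fun x => x % 2 ≠ 0) := by
    rw [List.countP_pos_iff]
    simp
  simp only [zero_add, he, ho]
  rw [hsum]
  split_ifs with h1 h2 <;> first | rfl | (exfalso; omega)
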